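-- pv_equiv track=rewrite | github.com/Nansoouu/x-translator-mvp | backend/core/whisper_hallucination_filter.py | _detect_repeating_loops
-- ===== SOURCE A (Python) =====
-- def _normalize(text: str) -> str:
--     """Normalise un texte pour la comparaison (lowercase, trim, supprime ponctuation de fin)."""
--     return text.lower().strip().rstrip(".,!?;:")
--
-- def _detect_repeating_loops(blocks: list[dict]) -> set[int]:
--     """
--     Détecte les blocs répétés en boucle (même texte consécutif 2+ fois).
--     Retourne les indices des blocs à supprimer (garder la 1ère occurrence).
--
--     Cas typique : Whisper répète la dernière phrase 5-6 fois sur les silences de fin.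
--     """
--     to_remove: set[int] = set()
--     if len(blocks) < 2:
--         return to_remove
--
--     for i in range(1, len(blocks)):
--         prev = _normalize(blocks[i - 1]["text"])
--         curr = _normalize(blocks[i]["text"])
--         if prev and curr and prev == curr:
--             to_remove.add(i)
--
--     return to_remove
-- ===== SOURCE B (Python) =====
-- def _normalize(text: str) -> str:
--     return text.lower().strip().rstrip(".,!?;:")
--
-- def _detect_repeating_loops(blocks: list[dict]) -> set[int]:
--     to_remove: set[int] = set()
--     if len(blocks) < 2:
--         return to_remove
--     # normalize every text once, then scan maximal runs of equal values
--     norm = [_normalize(b["text"]) for b in blocks]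
--     i, n = 0, len(norm)
--     while i < n:
--         j = i + 1
--         while j < n and norm[j] == norm[i]:
--             j += 1
--         if norm[i]:
--             to_remove.update(range(i + 1, j))
--         i = j
--     return to_remove
-- ===== Notes on version B (the rewrite author's own statement) =====
-- stated objective: alternative
-- what changed: B normalizes every block text exactly once into a list and then scans maximal runs of equal normalized values with a two-pointer loop, marking all indices after the first of each non-empty run, instead of A's pairwise adjacent comparison that re-normalizes each text twice.
import Mathlib
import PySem

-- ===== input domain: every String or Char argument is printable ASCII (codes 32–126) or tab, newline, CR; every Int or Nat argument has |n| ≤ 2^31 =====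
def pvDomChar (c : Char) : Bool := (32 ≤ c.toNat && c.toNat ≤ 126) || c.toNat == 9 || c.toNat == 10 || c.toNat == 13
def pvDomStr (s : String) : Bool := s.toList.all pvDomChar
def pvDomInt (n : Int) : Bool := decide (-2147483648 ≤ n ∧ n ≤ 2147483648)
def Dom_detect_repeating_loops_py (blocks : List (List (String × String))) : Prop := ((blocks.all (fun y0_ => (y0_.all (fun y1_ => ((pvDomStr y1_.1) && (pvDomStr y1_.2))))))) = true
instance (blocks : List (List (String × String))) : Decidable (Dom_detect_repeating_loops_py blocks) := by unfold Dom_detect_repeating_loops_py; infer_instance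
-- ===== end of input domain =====

-- B normalizes each block text once into a list and marks run-tails by scanning maximal runs of
-- equal normalized values (alternative decomposition; A compares adjacent pairs, normalizing each text twice).


-- ===== PORT A =====
-- _normalize: text.lower().strip().rstrip(".,!?;:").  PySem has no right-only strip with a char
-- set, so rstrip(chars) is ported by hand (exact: drops exactly the trailing characters of the set).
def pvRstripPunct (cs : List Char) : List Char :=
  (cs.reverse.dropWhile (fun c => c ∈ ['.', ',', '!', '?', ';', ':'])).reverse

def pvNormalize (t : String) : String :=
  String.ofList (pvRstripPunct (PySem.Str.strip (PySem.Str.lower t)).toList)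

-- blocks[i]["text"]: the list index is always in range (i ∈ range(1, len)); a missing "text" key
-- raises KeyError in Python and is excluded by Pre_, so the port reads it with default "".
def detect_repeating_loops_py (blocks : List (List (String × String))) : List Int :=
  if blocks.length < 2 then []
  else
    (PySem.List.pyRange 1 blocks.length 1).foldl
      (fun to_remove i =>
        let prev := pvNormalize (((PySem.Dict.mk (PySem.List.pyGetD blocks (i - 1) [])).get? "text").getD "")
        let curr := pvNormalize (((PySem.Dict.mk (PySem.List.pyGetD blocks i [])).get? "text").getD "")
        if prev ≠ "" ∧ curr ≠ "" ∧ prev = curr then PySem.Set.add to_remove i else to_remove)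
      (PySem.Set.empty)

-- ===== PORT B =====
-- the outer while-loop of Source B: scan maximal runs of equal normalized values; for a run with a
-- non-empty value, mark every index after the first (the inner while is takeWhile/dropWhile).
def pvRuns : List String → Int → List Int
  | [], _ => []
  | x :: rest, i =>
    let run := rest.takeWhile (fun y => y == x)
    (if x ≠ "" then PySem.List.pyRange (i + 1) (i + 1 + run.length) 1 else [])
      ++ pvRuns (rest.dropWhile (fun y => y == x)) (i + 1 + run.length)
termination_by xs _ => xs.length
decreasing_by
  exact Nat.lt_succ_of_le (List.length_dropWhile_le _ _)

def detect_repeating_loops_py_alt (blocks : List (List (String × String))) : List Int :=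
  if blocks.length < 2 then []
  else
    let norm := blocks.map (fun b => pvNormalize (((PySem.Dict.mk b).get? "text").getD ""))
    pvRuns norm 0

-- ===== PRECONDITION & SPEC =====
-- Pre_ excludes exactly the inputs where the Python raises: with 2 or more blocks, some block
-- lacks the "text" key (KeyError, in both A and B; with fewer than 2 blocks no block is read).
def Pre_detect_repeating_loops_py (blocks : List (List (String × String))) : Prop :=
  blocks.length < 2 ∨ (blocks.all (fun b => b.any (fun p => p.1 == "text"))) = true
instance (blocks : List (List (String × String))) : Decidable (Pre_detect_repeating_loops_py blocks) := by unfold Pre_detect_repeating_loops_py; infer_instance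

def pvWitness_detect_repeating_loops_py : (List (List (String × String))) :=
  [[("text", "Hello.")], [("text", " hello ")], [("text", "bye")]]

def Spec_detect_repeating_loops_py (blocks : List (List (String × String))) (out : List Int) : Prop := out = detect_repeating_loops_py_alt blocks
instance (blocks : List (List (String × String))) (out : List Int) : Decidable (Spec_detect_repeating_loops_py blocks out) := by unfold Spec_detect_repeating_loops_py; infer_instance

-- ===== CLAIM (what is proved, stated in full; the proofs are below) =====
def Claim_equal_detect_repeating_loops_py : Prop := ∀ (blocks : List (List (String × String))), Dom_detect_repeating_loops_py blocks → Pre_detect_repeating_loops_py blocks → Spec_detect_repeating_loops_py blocks (detect_repeating_loops_py blocks)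

-- ===== LEMMAS AND PROOFS =====

-- the common pivot: for each adjacent pair (prev, x) at index i, emit i iff both normalized
-- texts are non-empty and equal.
def pvPairSpec : String → List String → Int → List Int
  | _, [], _ => []
  | prev, x :: xs, i =>
    (if prev ≠ "" ∧ x ≠ "" ∧ prev = x then [i] else []) ++ pvPairSpec x xs (i + 1)

-- A's loop: folding set.add over distinct fresh elements is a filter.
theorem pv_foldl_setadd (p : Int → Prop) [DecidablePred p] :
    ∀ (l : List Int) (acc : List Int), l.Nodup → (∀ x ∈ l, x ∉ acc) →
      List.foldl (fun s x => if p x then PySem.Set.add s x else s) acc l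
        = acc ++ l.filter (fun x => decide (p x)) := by
  intro l
  induction l with
  | nil => intro acc _ _; simp
  | cons y t ih =>
      intro acc hnd hfr
      have hy : y ∉ acc := hfr y (by simp)
      have hadd : PySem.Set.add acc y = acc ++ [y] := by
        simp [PySem.Set.add, PySem.Set.contains, hy]
      have hnd' : t.Nodup := (List.nodup_cons.mp hnd).2
      have hyt : y ∉ t := (List.nodup_cons.mp hnd).1
      by_cases hp : p y
      · have hfr' : ∀ x ∈ t, x ∉ acc ++ [y] := by
          intro x hx
          simp only [List.mem_append, List.mem_singleton]
          rintro (h | rfl)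
          · exact hfr x (by simp [hx]) h
          · exact hyt hx
        simp only [List.foldl_cons, if_pos hp, hadd, ih (acc ++ [y]) hnd' hfr',
          List.filter_cons, decide_eq_true hp]
        simp
      · have hfr' : ∀ x ∈ t, x ∉ acc := fun x hx => hfr x (by simp [hx])
        simp only [List.foldl_cons, if_neg hp, ih acc hnd' hfr', List.filter_cons]
        simp [hp]

-- the filtered index range over a fixed normalized list IS pvPairSpec.
theorem pv_filter_range (norm : List String) :
    ∀ (m k : Nat), norm.length - k = m → 1 ≤ k → k ≤ norm.length →
      (PySem.List.pyRange (k : Int) (norm.length : Int) 1).filter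
          (fun i => decide (PySem.List.pyGetD norm (i - 1) "" ≠ "" ∧
                            PySem.List.pyGetD norm i "" ≠ "" ∧
                            PySem.List.pyGetD norm (i - 1) "" = PySem.List.pyGetD norm i ""))
        = pvPairSpec (norm.getD (k - 1) "") (norm.drop k) (k : Int) := by
  intro m
  induction m with
  | zero =>
      intro k h0 h1 h2
      have hk : k = norm.length := by omega
      subst hk
      rw [PySem.List.pyRange_one_eq_nil (by omega)]
      simp [List.drop_length, pvPairSpec]
  | succ m ih =>
      intro k h0 h1 h2
      have hklt : k < norm.length := by omega
      rw [PySem.List.pyRange_one_cons (by exact_mod_cast hklt)]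
      have hcast : ((k : Int) + 1) = ((k + 1 : Nat) : Int) := by push_cast; ring
      have hk1 : (k : Int) - 1 = ((k - 1 : Nat) : Int) := by omega
      have hdrop : norm.drop k = norm[k] :: norm.drop (k + 1) :=
        List.drop_eq_getElem_cons hklt
      have hgk : norm.getD k "" = norm[k] := List.getD_eq_getElem norm "" hklt
      have ihres := ih (k + 1) (by omega) (by omega) (by omega)
      rw [List.filter_cons]
      rw [hdrop]
      simp only [pvPairSpec]
      rw [hcast, ihres]
      have hg1 : PySem.List.pyGetD norm ((k : Int) - 1) "" = norm.getD (k - 1) "" := by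
        rw [hk1, PySem.List.pyGetD_natCast]
      have hg2 : PySem.List.pyGetD norm (k : Int) "" = norm[k] := by
        rw [PySem.List.pyGetD_natCast, hgk]
      have hgd : norm.getD ((k + 1) - 1) "" = norm[k] := by
        simpa using hgk
      rw [hgd]
      simp only [hg1, hg2]
      by_cases hc : (norm.getD (k - 1) "" ≠ "" ∧ norm[k] ≠ "" ∧ norm.getD (k - 1) "" = norm[k])
      · rw [decide_eq_true hc, if_pos hc]
        simp
      · rw [decide_eq_false hc, if_neg hc]
        simp

-- a maximal run of copies of x inside pvPairSpec emits exactly the index range of its tail.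
theorem pv_pairSpec_run (x : String) :
    ∀ (t : List String), (∀ e ∈ t, e = x) → ∀ (d : List String) (j : Int),
      pvPairSpec x (t ++ d) j
        = (if x ≠ "" then PySem.List.pyRange j (j + t.length) 1 else [])
            ++ pvPairSpec x d (j + t.length) := by
  intro t
  induction t with
  | nil =>
      intro _ d j
      simp [PySem.List.pyRange_one_eq_nil (le_refl j)]
  | cons e t ih =>
      intro he d j
      have hex : e = x := he e (by simp)
      subst hex
      have ih' := ih (fun a ha => he a (by simp [ha])) d (j + 1)
      have hlen : (((e :: t).length : Nat) : Int) = (t.length : Int) + 1 := by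
        simp
      have hshift : j + 1 + (t.length : Int) = j + ((t.length : Int) + 1) := by ring
      simp only [List.cons_append, pvPairSpec, ih', hlen, hshift]
      by_cases hx : e = ""
      · rw [if_neg (by simp [hx]), if_neg (by intro h; exact h hx),
            if_neg (by intro h; exact h hx)]
        simp
      · rw [if_pos (by simp [hx]), if_pos hx, if_pos hx,
            PySem.List.pyRange_one_cons (by omega : j < j + ((t.length : Int) + 1))]
        simp

-- B's run scan computes pvPairSpec of the tail against the head.
def pvTop : List String → Int → List Int
  | [], _ => []
  | x :: rest, i => pvPairSpec x rest (i + 1)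

theorem pv_runs_eq : ∀ (n : Nat) (xs : List String), xs.length = n → ∀ (i : Int),
    pvRuns xs i = pvTop xs i := by
  intro n
  induction n using Nat.strong_induction_on with
  | _ n ih =>
    intro xs hlen i
    match xs with
    | [] => simp [pvRuns, pvTop]
    | x :: rest =>
      rw [pvRuns]
      set t := rest.takeWhile (fun y => y == x) with ht
      set d := rest.dropWhile (fun y => y == x) with hd
      have hrest : t ++ d = rest := List.takeWhile_append_dropWhile
      have htx : ∀ e ∈ t, e = x := by
        intro e hemem
        have := List.mem_takeWhile_imp (ht ▸ hemem)
        simpa using this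
      have hrun := pv_pairSpec_run x t htx d (i + 1)
      have hdlen : d.length < n := by
        have := List.length_dropWhile_le (fun y => y == x) rest
        rw [← hd] at this
        simp only [← hlen, List.length_cons]
        omega
      have hdTop := ih d.length hdlen d rfl (i + 1 + t.length)
      show _ = pvPairSpec x rest (i + 1)
      rw [← hrest, hrun, hdTop]
      congr 1
      match hdm : d with
      | [] => simp [pvTop, pvPairSpec]
      | y :: d' =>
        have hyx : (y == x) = false := by
          have h2 := List.head_dropWhile_not (fun y => y == x) (l := rest) (by simp [← hd])
          simpa [List.head_eq_iff_head?_eq_some, ← hd] using h2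
        have hyx' : x ≠ y := fun h => by simp [h] at hyx
        simp only [pvTop, pvPairSpec]
        rw [if_neg]
        · simp
        · rintro ⟨-, -, h⟩; exact hyx' h

-- ===== VERDICT (by name: the statement is the Claim_ definition above) =====
theorem detect_repeating_loops_py_spec : Claim_equal_detect_repeating_loops_py := by
  intro blocks _ _
  unfold Spec_detect_repeating_loops_py
  by_cases hlt : blocks.length < 2
  · simp [detect_repeating_loops_py, detect_repeating_loops_py_alt, hlt]
  · match hB : blocks with
    | [] => simp at hlt
    | [_] => simp at hlt
    | b0 :: b1 :: bs =>
      have hlen2 : ¬ (b0 :: b1 :: bs).length < 2 := by simp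
      simp only [detect_repeating_loops_py, detect_repeating_loops_py_alt, if_neg hlen2]
      set g : List (String × String) → String :=
        fun b => pvNormalize (((PySem.Dict.mk b).get? "text").getD "") with hg
      set norm := (b0 :: b1 :: bs).map g with hnorm
      rw [pv_foldl_setadd
            (fun i => (pvNormalize (((PySem.Dict.mk (PySem.List.pyGetD (b0 :: b1 :: bs) (i - 1) [])).get? "text").getD "") ≠ "" ∧
                       pvNormalize (((PySem.Dict.mk (PySem.List.pyGetD (b0 :: b1 :: bs) i [])).get? "text").getD "") ≠ "" ∧
                       pvNormalize (((PySem.Dict.mk (PySem.List.pyGetD (b0 :: b1 :: bs) (i - 1) [])).get? "text").getD "") =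
                       pvNormalize (((PySem.Dict.mk (PySem.List.pyGetD (b0 :: b1 :: bs) i [])).get? "text").getD "")))
            _ PySem.Set.empty (PySem.List.nodup_pyRange_one _ _) (by intro x _; simp [PySem.Set.empty])]
      have hgmap : ∀ (j : Int), g (PySem.List.pyGetD (b0 :: b1 :: bs) j []) = PySem.List.pyGetD norm j "" := by
        intro j
        have hge : g [] = "" := by rfl
        rw [hnorm, ← hge, PySem.List.pyGetD_map g (b0 :: b1 :: bs) j []]
      have hfc : (PySem.List.pyRange 1 ((b0 :: b1 :: bs).length : Int) 1).filter
            (fun i => decide ((g (PySem.List.pyGetD (b0 :: b1 :: bs) (i - 1) []) ≠ "" ∧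
                               g (PySem.List.pyGetD (b0 :: b1 :: bs) i []) ≠ "" ∧
                               g (PySem.List.pyGetD (b0 :: b1 :: bs) (i - 1) []) =
                               g (PySem.List.pyGetD (b0 :: b1 :: bs) i []))))
          = (PySem.List.pyRange 1 ((b0 :: b1 :: bs).length : Int) 1).filter
            (fun i => decide ((PySem.List.pyGetD norm (i - 1) "" ≠ "" ∧
                               PySem.List.pyGetD norm i "" ≠ "" ∧
                               PySem.List.pyGetD norm (i - 1) "" = PySem.List.pyGetD norm i ""))) := by
        apply List.filter_congr
        intro i _
        simp only [hgmap]
      have hlennorm : norm.length = (b0 :: b1 :: bs).length := by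
        rw [hnorm]; exact List.length_map ..
      have hfr := pv_filter_range norm (norm.length - 1) 1 rfl (le_refl 1) (by simp [hlennorm])
      have hruns := pv_runs_eq norm.length norm rfl 0
      simp only [PySem.Set.empty, List.nil_append]
      rw [hfc]
      rw [← hlennorm]
      rw [show ((1 : Nat) : Int) = (1 : Int) from rfl] at hfr
      rw [hfr, hruns]
      rw [hnorm]
      simp only [List.map_cons, pvTop, List.getD, List.drop_one, List.tail_cons, zero_add]
      rfl
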